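-- pv_equiv track=rewrite | github.com/principia12/python-tutorial | docs/examples/example_class2.py | _create_bow
-- ===== SOURCE A (Python) =====
-- def _create_bow(input_str):
--     res = {}
--     for elem in input_str.split():
--         if elem in res.keys():
--             res[elem] += 1
--         else:
--             res[elem] = 1
--     return res
-- ===== SOURCE B (Python) =====
-- def _create_bow(input_str):
--     # Different decomposition: dedup the word list (first occurrences, via
--     # dict.fromkeys) and compute each distinct word's frequency with .count,
--     # instead of A's single accumulating pass over raw tokens.
--     words = input_str.split()
--     return {w: words.count(w) for w in dict.fromkeys(words)}
-- ===== Notes on version B (the rewrite author's own statement) =====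
-- stated objective: alternative
-- what changed: B replaces A's single hash-accumulating pass (membership test, then increment-or-insert) with a two-stage decomposition: order-preserving dedup of the token list via dict.fromkeys, then a dict comprehension mapping each distinct word to words.count(w).
import Mathlib
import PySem

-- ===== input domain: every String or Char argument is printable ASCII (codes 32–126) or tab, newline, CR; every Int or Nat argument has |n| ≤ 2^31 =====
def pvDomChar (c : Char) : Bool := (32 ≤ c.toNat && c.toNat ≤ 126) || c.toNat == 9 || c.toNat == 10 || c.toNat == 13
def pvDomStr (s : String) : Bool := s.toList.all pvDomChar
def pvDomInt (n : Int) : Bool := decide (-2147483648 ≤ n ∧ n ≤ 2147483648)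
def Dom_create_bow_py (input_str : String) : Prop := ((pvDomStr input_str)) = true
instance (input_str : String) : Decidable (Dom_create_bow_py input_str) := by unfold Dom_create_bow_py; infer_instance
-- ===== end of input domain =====

-- B replaces A's accumulating counter pass by "ordered dedup, then count each
-- distinct word" (alternative decomposition, same results, not claimed faster).

-- ===== PORT A =====
-- for elem in input_str.split(): if elem in res: res[elem] += 1 else: res[elem] = 1
def create_bow_py (input_str : String) : List (String × Int) :=
  ((PySem.Str.split₀ input_str).foldl
    (fun res elem =>
      if res.contains elem then res.insert elem (res.getD elem 0 + 1)
      else res.insert elem 1)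
    PySem.Dict.empty).items

-- ===== PORT B =====
-- words = input_str.split(); {w: words.count(w) for w in dict.fromkeys(words)}
def create_bow_py_alt (input_str : String) : List (String × Int) :=
  let words := PySem.Str.split₀ input_str
  (PySem.List.dedup words).map (fun w => (w, (words.count w : Int)))

-- ===== PRECONDITION & SPEC =====
def Spec_create_bow_py (input_str : String) (out : List (String × Int)) : Prop := out = create_bow_py_alt input_str
instance (input_str : String) (out : List (String × Int)) : Decidable (Spec_create_bow_py input_str out) := by unfold Spec_create_bow_py; infer_instance

-- ===== CLAIM (what is proved, stated in full; the proofs are below) =====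
def Claim_equal_create_bow_py : Prop := ∀ (input_str : String), Dom_create_bow_py input_str → Spec_create_bow_py input_str (create_bow_py input_str)

-- ===== LEMMAS AND PROOFS =====

-- A's loop body ('increment if present, else set to 1') is pointwise the
-- standard counter step 'insert w (getD w 0 + 1)'.
theorem create_bow_step_eq (res : PySem.Dict String Int) (elem : String) :
    (if res.contains elem then res.insert elem (res.getD elem 0 + 1)
     else res.insert elem 1)
    = res.insert elem (res.getD elem 0 + 1) := by
  by_cases h : res.contains elem = true
  · simp [h]
  · have h0 : res.getD elem 0 = 0 := by
      simp [PySem.Dict.getD_of_not_contains, h]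
    simp [h, h0]

-- ===== VERDICT (by name: the statement is the Claim_ definition above) =====
theorem create_bow_py_spec : Claim_equal_create_bow_py := by
  intro s _
  unfold Spec_create_bow_py create_bow_py create_bow_py_alt
  have hstep : ((PySem.Str.split₀ s).foldl
      (fun res elem =>
        if res.contains elem then res.insert elem (res.getD elem 0 + 1)
        else res.insert elem 1) PySem.Dict.empty)
      = PySem.Dict.counter (PySem.Str.split₀ s) := by
    rw [show (fun (res : PySem.Dict String Int) elem =>
        if res.contains elem then res.insert elem (res.getD elem 0 + 1)
        else res.insert elem 1)
      = (fun res elem => res.insert elem (res.getD elem 0 + 1)) from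
        funext fun res => funext fun elem => create_bow_step_eq res elem]
    exact PySem.Dict.foldl_insert_getD_add_one_eq_counter _
  rw [hstep, PySem.Dict.items_counter]
  simp [PySem.List.dedup_eq_ofList]
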